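-- pv_equiv track=rewrite | github.com/ChrisPool999/ChrisPool999.github.io | Assignment4/top_elements.py | top_elements
-- ===== SOURCE A (Python) =====
-- import heapq
-- import queue
--
-- def add_child(heap: list[int], map: dict, value: int, index: int) -> None:
-- 	heapq.heappush(heap, -value)
--
-- 	if value not in map:
-- 		map[value] = queue.Queue()
-- 		map[value].put(index)
-- 	else:
-- 		map[value].put(index)
--
-- def top_elements(nums: list[int], k: int) -> list[int]:
-- 	if k < 0 or k > len(nums):
-- 		raise ValueError("k must between 1 and length of list")
--
-- 	result = []
--
-- 	# mark negative to get max_heap (heapq only supports min heap)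
-- 	max_heap = [-nums[0]]
--
-- 	# queue for duplicates
-- 	value_to_index = {nums[0] : queue.Queue()}
-- 	value_to_index[nums[0]].put(0)
--
-- 	while len(result) != k:
-- 		root = -(heapq.heappop(max_heap))
-- 		result.append(root)
-- 		root_index = value_to_index[root].get()
--
-- 		left = (root_index * 2) + 1
-- 		right = (root_index * 2) + 2
--
-- 		if left < len(nums):
-- 			add_child(max_heap, value_to_index, nums[left], left)
-- 		if right < len(nums):
-- 			add_child(max_heap, value_to_index, nums[right], right)
--
-- 	return result
-- ===== SOURCE B (Python) =====
-- def top_elements(nums: list[int], k: int) -> list[int]: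
-- 	if k < 0 or k > len(nums):
-- 		raise ValueError("k must between 1 and length of list")
--
-- 	result = []
-- 	# candidate frontier: (value, index) pairs in insertion order
-- 	candidates = [(nums[0], 0)]
--
-- 	while len(result) != k:
-- 		mx = max(v for v, _ in candidates)
-- 		# first (earliest-inserted) candidate holding the max value
-- 		j = next(i for i, p in enumerate(candidates) if p[0] == mx)
-- 		value, idx = candidates.pop(j)
-- 		result.append(value)
--
-- 		left = idx * 2 + 1
-- 		right = idx * 2 + 2
-- 		if left < len(nums):
-- 			candidates.append((nums[left], left))
-- 		if right < len(nums):
-- 			candidates.append((nums[right], right))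
--
-- 	return result
-- ===== Notes on version B (the rewrite author's own statement) =====
-- stated objective: simpler
-- what changed: Replaced A's heapq max-heap plus the value-to-FIFO-Queue dict by a single insertion-ordered candidate list that is re-scanned for its maximum (first occurrence wins) each round, eliminating the heap and the auxiliary dict/queues entirely.
import Mathlib
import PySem

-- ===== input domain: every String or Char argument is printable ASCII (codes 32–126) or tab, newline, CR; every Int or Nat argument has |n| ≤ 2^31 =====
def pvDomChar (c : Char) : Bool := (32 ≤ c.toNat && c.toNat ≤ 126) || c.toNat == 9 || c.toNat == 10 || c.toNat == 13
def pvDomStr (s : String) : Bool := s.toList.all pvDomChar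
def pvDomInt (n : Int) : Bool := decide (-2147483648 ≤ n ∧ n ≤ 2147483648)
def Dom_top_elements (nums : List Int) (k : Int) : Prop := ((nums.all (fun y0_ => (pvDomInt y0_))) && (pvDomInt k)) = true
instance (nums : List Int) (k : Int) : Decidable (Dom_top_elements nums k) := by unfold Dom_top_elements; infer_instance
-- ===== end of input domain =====

-- B replaces A's heapq max-heap plus value→FIFO-queue dict by one insertion-ordered
-- candidate list scanned for its maximum each round (simpler: one structure, no heap, no dict).

-- ===== PORT A =====
-- heapq is ported by its contract on Int elements: the heap list is kept sorted
-- ascending, heappush is ordered insert, heappop pops the head (the minimum) —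
-- exact here: heappop returns the minimum int of the heap, and equal ints are
-- indistinguishable, so the popped value is exactly heapq's.
def heappushA (heap : List Int) (x : Int) : List Int :=
  match heap with
  | [] => [x]
  | y :: ys => if x ≤ y then x :: y :: ys else y :: heappushA ys x

-- queue.Queue ported as a FIFO list: put appends, get pops the front (exact).
def add_child (heap : List Int) (map : PySem.Dict Int (List Int)) (value : Int) (index : Int) :
    List Int × PySem.Dict Int (List Int) :=
  let heap' := heappushA heap (-value)
  match map.get? value with
  | none   => (heap', map.insert value [index])          -- map[value] = Queue(); map[value].put(index)
  | some q => (heap', map.insert value (q ++ [index]))   -- map[value].put(index)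

-- the while loop: it runs exactly k times (len(result) grows by 1 each pass)
def topLoopA (nums : List Int) : Nat → List Int → PySem.Dict Int (List Int) → List Int
  | 0, _, _ => []
  | m + 1, maxHeap, valueToIndex =>
    match maxHeap with
    | [] => []          -- Python: heappop of an empty heap raises IndexError (unreachable inside Pre_)
    | h :: rest =>
      let root := -h
      let q := valueToIndex.getD root []
      let rootIndex := q.headD 0                          -- Queue.get (queue nonempty inside Pre_)
      let d1 := valueToIndex.insert root q.tail           -- get() removes the front in place
      let left := rootIndex * 2 + 1
      let right := rootIndex * 2 + 2
      let s1 := if left < (nums.length : Int) then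
                  add_child rest d1 (PySem.List.pyGetD nums left 0) left
                else (rest, d1)
      let s2 := if right < (nums.length : Int) then
                  add_child s1.1 s1.2 (PySem.List.pyGetD nums right 0) right
                else s1
      root :: topLoopA nums m s2.1 s2.2

def top_elements (nums : List Int) (k : Int) : List Int :=
  if k < 0 ∨ (nums.length : Int) < k then []              -- raise ValueError (outside Pre_)
  else
    match nums with
    | [] => []                                            -- nums[0] raises IndexError (outside Pre_)
    | n0 :: _ =>
      -- max_heap = [-nums[0]]; value_to_index = {nums[0]: Queue()}; put(0)
      topLoopA nums k.toNat [-n0] ((PySem.Dict.empty.insert n0 []).insert n0 [(0 : Int)])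

-- ===== PORT B =====
def topLoopB (nums : List Int) : Nat → List (Int × Int) → List Int
  | 0, _ => []
  | m + 1, candidates =>
    match (candidates.map Prod.fst).max? with
    | none => []       -- Python: max() of an empty sequence raises ValueError (unreachable inside Pre_)
    | some mx =>
      match candidates.find? (fun p => p.1 == mx) with
      | none => []     -- unreachable: the maximum is attained by some candidate
      | some c =>
        let cands1 := candidates.eraseP (fun p => p.1 == mx)   -- pop the first max candidate
        let left := c.2 * 2 + 1
        let right := c.2 * 2 + 2
        let cands2 := if left < (nums.length : Int) then
                        cands1 ++ [(PySem.List.pyGetD nums left 0, left)] else cands1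
        let cands3 := if right < (nums.length : Int) then
                        cands2 ++ [(PySem.List.pyGetD nums right 0, right)] else cands2
        c.1 :: topLoopB nums m cands3

def top_elements_alt (nums : List Int) (k : Int) : List Int :=
  if k < 0 ∨ (nums.length : Int) < k then []
  else
    match nums with
    | [] => []
    | n0 :: _ => topLoopB nums k.toNat [(n0, 0)]

-- ===== PRECONDITION & SPEC =====
-- Pre_ is exactly where A returns: A raises ValueError when k < 0 or k > len(nums),
-- and IndexError on nums[0] when nums is empty.
def Pre_top_elements (nums : List Int) (k : Int) : Prop :=
  nums ≠ [] ∧ 0 ≤ k ∧ k ≤ (nums.length : Int)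
instance (nums : List Int) (k : Int) : Decidable (Pre_top_elements nums k) := by
  unfold Pre_top_elements; infer_instance

def pvWitness_top_elements : List Int × Int := ([5, 3, 4, 1, 3], 3)

def Spec_top_elements (nums : List Int) (k : Int) (out : List Int) : Prop := out = top_elements_alt nums k
instance (nums : List Int) (k : Int) (out : List Int) : Decidable (Spec_top_elements nums k out) := by unfold Spec_top_elements; infer_instance

-- ===== CLAIM (what is proved, stated in full; the proofs are below) =====
def Claim_equal_top_elements : Prop := ∀ (nums : List Int) (k : Int), Dom_top_elements nums k → Pre_top_elements nums k → Spec_top_elements nums k (top_elements nums k)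

-- ===== LEMMAS AND PROOFS =====

-- The simulation invariant tying A's (heap, dict) state to B's candidate list:
-- the heap is the sorted list of negated candidate values, and each dict queue
-- holds the indices of the candidates with that value, in insertion order.
def HInv (heap : List Int) (d : PySem.Dict Int (List Int)) (cands : List (Int × Int)) : Prop :=
  heap.Pairwise (· ≤ ·) ∧
  heap.Perm (cands.map (fun p => -p.1)) ∧
  ∀ v : Int, d.getD v [] = (cands.filter (fun p => p.1 == v)).map Prod.snd

theorem heappushA_perm (heap : List Int) (x : Int) :
    (heappushA heap x).Perm (x :: heap) := by
  induction heap with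
  | nil => simp [heappushA]
  | cons y ys ih =>
    by_cases hx : x ≤ y
    · simp [heappushA, if_pos hx]
    · simp only [heappushA, if_neg hx]
      exact (ih.cons y).trans (List.Perm.swap x y ys)

theorem heappushA_sorted (heap : List Int) (x : Int) (h : heap.Pairwise (· ≤ ·)) :
    (heappushA heap x).Pairwise (· ≤ ·) := by
  induction heap with
  | nil => simp [heappushA]
  | cons y ys ih =>
    rw [List.pairwise_cons] at h
    by_cases hx : x ≤ y
    · simp only [heappushA, if_pos hx, List.pairwise_cons]
      refine ⟨?_, ?_⟩
      · intro b hb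
        rcases List.mem_cons.1 hb with hb | hb
        · omega
        · exact le_trans hx (h.1 _ hb)
      · exact ⟨h.1, h.2⟩
    · simp only [heappushA, if_neg hx, List.pairwise_cons]
      refine ⟨?_, ih h.2⟩
      intro b hb
      have hb' : b ∈ x :: ys := ((heappushA_perm ys x).mem_iff).1 hb
      rcases List.mem_cons.1 hb' with hb' | hb'
      · omega
      · exact h.1 _ hb'

theorem filter_eraseP_self {α : Type} (p : α → Bool) (l : List α) :
    (l.eraseP p).filter p = (l.filter p).tail := by
  induction l with
  | nil => rfl
  | cons x xs ih =>
    by_cases hx : p x = true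
    · simp [hx]
    · simp only [Bool.not_eq_true] at hx
      simp [hx, ih]

theorem filter_eraseP_ne {α : Type} (p q : α → Bool) (l : List α)
    (h : ∀ x, p x = true → q x = false) :
    (l.eraseP p).filter q = l.filter q := by
  induction l with
  | nil => rfl
  | cons x xs ih =>
    by_cases hx : p x = true
    · simp [hx, h x hx]
    · simp only [Bool.not_eq_true] at hx
      simp only [List.eraseP_cons, hx, List.filter_cons]
      cases hq : q x <;> simp [hq, ih]

theorem add_child_heap (heap : List Int) (d : PySem.Dict Int (List Int)) (v i : Int) :
    (add_child heap d v i).1 = heappushA heap (-v) := by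
  unfold add_child; cases d.get? v <;> rfl

theorem add_child_dict (heap : List Int) (d : PySem.Dict Int (List Int)) (v i : Int) :
    (add_child heap d v i).2 = d.insert v (d.getD v [] ++ [i]) := by
  unfold add_child
  cases hg : d.get? v with
  | none => simp [PySem.Dict.getD_eq_get?_getD, hg]
  | some q => simp [PySem.Dict.getD_eq_get?_getD, hg]

theorem add_child_inv (heap : List Int) (d : PySem.Dict Int (List Int))
    (cands : List (Int × Int)) (v i : Int) (h : HInv heap d cands) :
    HInv (add_child heap d v i).1 (add_child heap d v i).2 (cands ++ [(v, i)]) := by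
  obtain ⟨h1, h2, h3⟩ := h
  rw [HInv, add_child_heap, add_child_dict]
  refine ⟨heappushA_sorted _ _ h1, ?_, ?_⟩
  · have : ((cands ++ [(v, i)]).map (fun p => -p.1)).Perm (-v :: cands.map (fun p => -p.1)) := by
      simp only [List.map_append, List.map_cons, List.map_nil]
      exact List.perm_append_singleton _ _
    exact ((heappushA_perm heap (-v)).trans (h2.cons (-v))).trans this.symm
  · intro w
    rw [PySem.Dict.getD_insert]
    by_cases hw : w = v
    · subst hw
      simp [List.filter_append, h3 w, List.map_append]
    · simp only [if_neg hw, h3 w, List.filter_append]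
      have : ((v, i).1 == w) = false := by simp; omega
      simp [this]

theorem loop_sim (nums : List Int) (m : Nat) (heap : List Int)
    (d : PySem.Dict Int (List Int)) (cands : List (Int × Int)) (h : HInv heap d cands) :
    topLoopA nums m heap d = topLoopB nums m cands := by
  induction m generalizing heap d cands with
  | zero => rfl
  | succ m ih =>
    obtain ⟨h1, h2, h3⟩ := h
    cases heap with
    | nil =>
      have hc : cands = [] := by
        have := h2.length_eq
        simp only [List.length_nil, List.length_map] at this
        exact List.eq_nil_of_length_eq_zero this.symm
      subst hc
      rfl
    | cons hd rest =>
      -- hd is the heap minimum, so -hd is B's maximum candidate value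
      have hub : ∀ b ∈ cands.map Prod.fst, b ≤ -hd := by
        intro b hb
        have : -b ∈ hd :: rest := h2.mem_iff.2 (by
          simp only [List.mem_map] at hb ⊢
          obtain ⟨p, hp, rfl⟩ := hb
          exact ⟨p, hp, rfl⟩)
        rcases List.mem_cons.1 this with hb' | hb'
        · omega
        · have := (List.pairwise_cons.1 h1).1 _ hb'
          omega
      have hmem : -hd ∈ cands.map Prod.fst := by
        have : hd ∈ cands.map (fun p => -p.1) := h2.mem_iff.1 List.mem_cons_self
        simp only [List.mem_map] at this ⊢
        obtain ⟨p, hp, hph⟩ := this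
        exact ⟨p, hp, by omega⟩
      have hmax : (cands.map Prod.fst).max? = some (-hd) :=
        List.max?_eq_some_iff.mpr ⟨hmem, hub⟩
      -- the first candidate carrying the maximum value
      have hFne : cands.filter (fun p => p.1 == -hd) ≠ [] := by
        simp only [List.mem_map] at hmem
        obtain ⟨p, hp, hph⟩ := hmem
        exact List.ne_nil_of_mem (List.mem_filter.2 ⟨hp, by simp [hph]⟩)
      obtain ⟨c0, F', hFeq⟩ : ∃ c0 F', cands.filter (fun p => p.1 == -hd) = c0 :: F' := by
        cases hF : cands.filter (fun p => p.1 == -hd) with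
        | nil => exact absurd hF hFne
        | cons a b => exact ⟨a, b, rfl⟩
      have hfind : cands.find? (fun p => p.1 == -hd) = some c0 := by
        rw [← List.head?_filter, hFeq]; rfl
      have hc01 : c0.1 = -hd := by
        have : c0 ∈ cands.filter (fun p => p.1 == -hd) := by rw [hFeq]; exact List.mem_cons_self
        have := (List.mem_filter.1 this).2
        simpa using this
      -- step invariant after the pop
      have hpop : HInv rest (d.insert (-hd) (F'.map Prod.snd))
          (cands.eraseP (fun p => p.1 == -hd)) := by
        refine ⟨(List.pairwise_cons.1 h1).2, ?_, ?_⟩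
        · have e0 : ((fun y => y == hd) ∘ (fun p : Int × Int => -p.1)) =
              (fun p : Int × Int => p.1 == -hd) := by
            funext c
            rw [Bool.eq_iff_iff]
            simp only [Function.comp, beq_iff_eq]
            omega
          have e1 : (cands.eraseP (fun p => p.1 == -hd)).map (fun p => -p.1) =
              (cands.map (fun p => -p.1)).erase hd := by
            rw [List.erase_eq_eraseP', List.eraseP_map, e0]
          rw [e1]
          have := (List.Perm.erase hd h2.symm).symm
          rwa [List.erase_cons_head] at this
        · intro w
          rw [PySem.Dict.getD_insert]
          by_cases hw : w = -hd
          · subst hw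
            rw [if_pos rfl, filter_eraseP_self, hFeq]
            rfl
          · rw [if_neg hw, h3 w, filter_eraseP_ne]
            intro x hx
            have hx' : x.1 = -hd := by simpa using hx
            have hxw : x.1 ≠ w := by omega
            simpa using hxw
      -- reduce one round of both loops
      simp only [topLoopA, topLoopB, hmax, hfind, hc01, h3 (-hd), hFeq]
      refine congrArg (fun t => -hd :: t) ?_
      simp only [List.map_cons, List.headD_cons, List.tail_cons]
      by_cases hl : c0.2 * 2 + 1 < (nums.length : Int) <;>
        by_cases hr : c0.2 * 2 + 2 < (nums.length : Int) <;>
          simp only [hl, hr, if_false] <;>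
            first
              | exact ih _ _ _ (add_child_inv _ _ _ _ _ (add_child_inv _ _ _ _ _ hpop))
              | exact ih _ _ _ (add_child_inv _ _ _ _ _ hpop)
              | exact ih _ _ _ hpop

-- ===== VERDICT (by name: the statement is the Claim_ definition above) =====
theorem top_elements_spec : Claim_equal_top_elements := by
  intro nums k _ hpre
  obtain ⟨hne, hk0, hkl⟩ := hpre
  unfold Spec_top_elements
  cases nums with
  | nil => exact absurd rfl hne
  | cons n0 ns =>
    have hcond : ¬ (k < 0 ∨ ((n0 :: ns).length : Int) < k) := by omega
    simp only [top_elements, top_elements_alt, if_neg hcond]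
    apply loop_sim
    refine ⟨by simp, by simp, ?_⟩
    intro v
    rw [PySem.Dict.getD_insert, PySem.Dict.getD_insert]
    by_cases hv : v = n0
    · subst hv; simp
    · have : ((n0, (0 : Int)).1 == v) = false := by simp; omega
      simp [hv, this, PySem.Dict.getD_eq_get?_getD]
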